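-- pv_equiv track=rewrite | github.com/camousmen/PythonLearning | prakticum_task1.py | arr_to_byte_discrete
-- ===== SOURCE A (Python) =====
-- def arr_to_byte_discrete(arr):
--     len_arr = 0b1 << len(arr)
--     byte_arr = 0b0
--     for i in range(0, len(arr) - 1):
--         if not arr[i] | 0:
--             byte_arr = byte_arr | 0
--         else:
--             byte_arr = byte_arr | 1
--         byte_arr = byte_arr << 1
--     byte_arr = len_arr + byte_arr
--     return byte_arr
-- ===== SOURCE B (Python) =====
-- def arr_to_byte_discrete(arr):
--     if not arr:
--         return 1
--     total = 0
--     place = 2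
--     for x in reversed(arr[:-1]):
--         if x:
--             total += place
--         place *= 2
--     return place + total
-- ===== Notes on version B (the rewrite author's own statement) =====
-- stated objective: simpler
-- what changed: Replaces A's forward shift-and-or bit accumulation (byte = (byte | bit) << 1 per step, plus 1 << n) by a single right-to-left pass over arr[:-1] that adds an explicit doubling place value, using no bitwise operators.
import Mathlib
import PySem

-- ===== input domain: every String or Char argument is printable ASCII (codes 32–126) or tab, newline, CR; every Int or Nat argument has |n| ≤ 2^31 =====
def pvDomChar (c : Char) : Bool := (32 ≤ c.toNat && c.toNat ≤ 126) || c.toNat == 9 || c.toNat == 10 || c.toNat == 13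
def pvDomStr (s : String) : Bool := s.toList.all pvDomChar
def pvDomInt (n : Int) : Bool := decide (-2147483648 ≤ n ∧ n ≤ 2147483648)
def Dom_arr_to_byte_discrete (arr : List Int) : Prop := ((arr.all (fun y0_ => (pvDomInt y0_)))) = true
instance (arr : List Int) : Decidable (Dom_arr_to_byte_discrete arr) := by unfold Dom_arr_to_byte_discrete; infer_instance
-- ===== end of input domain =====

-- B replaces A's forward shift-and-or accumulation by a right-to-left pass over arr[:-1]
-- with an explicit place value (objective: simpler, no bitwise operators).

-- ===== PORT A =====
-- literal transliteration of A: 1 << len(arr); loop i in range(0, len(arr)-1),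
-- byte_arr = (byte_arr | bit) << 1, where the bit test is `not (arr[i] | 0)`.
def arr_to_byte_discrete (arr : List Int) : Int :=
  let len_arr : Int := (1 : Int) <<< arr.length
  let byte_arr : Int := 0
  let byte_arr :=
    (PySem.List.pyRange 0 ((arr.length : Int) - 1) 1).foldl
      (fun byte_arr i =>
        (if PySem.Int.bor (PySem.List.pyGetD arr i 0) 0 = 0
         then PySem.Int.bor byte_arr 0
         else PySem.Int.bor byte_arr 1) <<< (1 : Nat))
      byte_arr
  len_arr + byte_arr

-- ===== PORT B =====
-- literal transliteration of B: empty list -> 1; otherwise fold over reversed(arr[:-1])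
-- carrying (total, place), returning place + total.
def arr_to_byte_discrete_alt (arr : List Int) : Int :=
  if arr = [] then 1
  else
    let tp :=
      ((PySem.List.slice arr none (some (-1))).reverse).foldl
        (fun (tp : Int × Int) x =>
          (if x ≠ 0 then tp.1 + tp.2 else tp.1, tp.2 * 2)) (0, 2)
    tp.2 + tp.1

-- ===== PRECONDITION & SPEC =====
def Spec_arr_to_byte_discrete (arr : List Int) (out : Int) : Prop := out = arr_to_byte_discrete_alt arr
instance (arr : List Int) (out : Int) : Decidable (Spec_arr_to_byte_discrete arr out) := by unfold Spec_arr_to_byte_discrete; infer_instance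

-- ===== CLAIM (what is proved, stated in full; the proofs are below) =====
def Claim_equal_arr_to_byte_discrete : Prop := ∀ (arr : List Int), Dom_arr_to_byte_discrete arr → Spec_arr_to_byte_discrete arr (arr_to_byte_discrete arr)

-- ===== LEMMAS AND PROOFS =====

-- Python `b | 1` on an even int is `b + 1`.
theorem pv_bor_two_mul_one (k : Int) : PySem.Int.bor (2*k) 1 = 2*k + 1 := by
  have hnat : ∀ m : Nat, (2*m) ||| 1 = 2*m+1 := by
    intro m
    have := Nat.lor_bit false m true 0
    simp [Nat.bit] at this
    omega
  simp only [PySem.Int.bor]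
  norm_num
  split
  · next h =>
    have h2 : (2*k).toNat = 2 * k.toNat := by omega
    rw [h2, hnat]
    omega
  · omega

-- one step of A's loop body on an even accumulator
theorem pv_stepA_eq (b x : Int) (hb : ∃ m : Int, b = 2*m) :
    (if PySem.Int.bor x 0 = 0 then PySem.Int.bor b 0 else PySem.Int.bor b 1) <<< (1 : Nat)
      = 2 * (b + (if x = 0 then 0 else 1)) := by
  obtain ⟨m, rfl⟩ := hb
  simp only [PySem.Int.bor_zero, pv_bor_two_mul_one]
  split <;> simp [Int.shiftLeft_eq] <;> ring

-- A's loop with an even accumulator b, as 2^|l| * b plus its value from 0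
theorem pv_afold_shift (l : List Int) : ∀ b : Int, (∃ m : Int, b = 2*m) →
    l.foldl (fun b x =>
        (if PySem.Int.bor x 0 = 0 then PySem.Int.bor b 0 else PySem.Int.bor b 1) <<< (1 : Nat)) b
      = 2^l.length * b
        + l.foldl (fun b x =>
            (if PySem.Int.bor x 0 = 0 then PySem.Int.bor b 0 else PySem.Int.bor b 1) <<< (1 : Nat)) 0 := by
  induction l with
  | nil => intro b _; simp
  | cons x xs ih =>
    intro b hb
    simp only [List.foldl_cons,
      pv_stepA_eq b x hb, pv_stepA_eq 0 x ⟨0, by ring⟩,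
      ih _ ⟨b + (if x = 0 then 0 else 1), rfl⟩,
      ih _ ⟨0 + (if x = 0 then 0 else 1), rfl⟩]
    by_cases hx : x = 0 <;> simp [hx, List.length_cons, pow_succ] <;> ring

-- B's foldr over l computes (A's loop value from 0, 2^(|l|+1))
theorem pv_bfold (l : List Int) :
    l.foldr (fun x (tp : Int × Int) =>
        (if x ≠ 0 then tp.1 + tp.2 else tp.1, tp.2 * 2)) (0, 2)
      = (l.foldl (fun b x =>
            (if PySem.Int.bor x 0 = 0 then PySem.Int.bor b 0 else PySem.Int.bor b 1) <<< (1 : Nat)) 0,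
         2^(l.length + 1)) := by
  induction l with
  | nil => simp
  | cons x xs ih =>
    simp only [List.foldr_cons, ih, List.foldl_cons,
      pv_stepA_eq 0 x ⟨0, by ring⟩,
      pv_afold_shift xs _ ⟨0 + (if x = 0 then 0 else 1), rfl⟩]
    by_cases hx : x = 0 <;> simp [hx, List.length_cons, pow_succ] <;> try ring

-- ===== VERDICT (by name: the statement is the Claim_ definition above) =====
theorem arr_to_byte_discrete_spec : Claim_equal_arr_to_byte_discrete := by
  unfold Claim_equal_arr_to_byte_discrete
  intro arr _
  unfold Spec_arr_to_byte_discrete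
  by_cases hnil : arr = []
  · subst hnil; decide
  · have hlen : arr.dropLast.length + 1 = arr.length := by
      have h1 : (List.dropLast arr).length = arr.length - 1 := List.length_dropLast
      have h2 : arr.length ≠ 0 := by simpa using hnil
      omega
    -- A's range bound is the length of arr.dropLast
    have hb : (arr.length : Int) - 1 = ((arr.dropLast.length : Nat) : Int) := by
      omega
    -- indexing arr at i < len-1 equals indexing arr.dropLast
    have hidx : ∀ (b : Int), ∀ i ∈ PySem.List.pyRange 0 ((arr.dropLast.length : Nat) : Int) 1,
        (fun byte_arr i =>
          (if PySem.Int.bor (PySem.List.pyGetD arr i 0) 0 = 0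
           then PySem.Int.bor byte_arr 0
           else PySem.Int.bor byte_arr 1) <<< (1 : Nat)) b i
        = (fun byte_arr i =>
          (if PySem.Int.bor (PySem.List.pyGetD arr.dropLast i 0) 0 = 0
           then PySem.Int.bor byte_arr 0
           else PySem.Int.bor byte_arr 1) <<< (1 : Nat)) b i := by
      intro b i hi
      rw [PySem.List.mem_pyRange_one] at hi
      have g1 : PySem.List.pyGetD arr i 0 = arr[i.toNat]'(by omega) :=
        PySem.List.pyGetD_eq_getElem arr 0 hi.1 (by omega)
      have g2 : PySem.List.pyGetD arr.dropLast i 0 = arr.dropLast[i.toNat]'(by omega) :=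
        PySem.List.pyGetD_eq_getElem arr.dropLast 0 hi.1 (by omega)
      have g3 : arr.dropLast[i.toNat]'(by omega) = arr[i.toNat]'(by omega) :=
        List.getElem_dropLast ..
      simp only [g1, g2, g3]
    simp only [arr_to_byte_discrete, arr_to_byte_discrete_alt, if_neg hnil, hb,
      PySem.List.slice_to_neg_one, List.foldl_reverse]
    rw [PySem.List.foldl_congr_mem _ _ _ _ hidx,
      PySem.List.foldl_pyRange_zero_pyGetD' arr.dropLast 0
        (fun b x => (if PySem.Int.bor x 0 = 0 then PySem.Int.bor b 0 else PySem.Int.bor b 1) <<< (1 : Nat)) 0]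
    have hfr := pv_bfold arr.dropLast
    rw [show (fun (x : Int) (tp : Int × Int) => (if x ≠ 0 then tp.1 + tp.2 else tp.1, tp.2 * 2))
          = (fun x y => (fun (tp : Int × Int) x => (if x ≠ 0 then tp.1 + tp.2 else tp.1, tp.2 * 2)) y x) from rfl] at hfr
    rw [hfr, ← hlen]
    simp [Int.shiftLeft_eq]
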